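-- pv_equiv track=rewrite | github.com/TheOneRedFox69/Bryce-Job-Hunt | src/scraper_linkedin.py | _detect_block
-- ===== SOURCE A (Python) =====
-- def _detect_block(html: str) -> bool:
--     """Return True if LinkedIn returned a block/CAPTCHA page."""
--     markers = [
--         "authwall",
--         "checkpoint/challenge",
--         "we noticed some unusual activity",
--         "please complete this security check",
--         "captcha",
--         "cf-browser-verification",
--     ]
--     lower = html.lower()
--     return any(m in lower for m in markers)
-- ===== SOURCE B (Python) =====
-- def _detect_block(html: str) -> bool:
--     """Return True if LinkedIn returned a block/CAPTCHA page.
--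
--     Single left-to-right sweep: at each position of the lowered text, test
--     whether any marker starts there, instead of one full substring scan per
--     marker.
--     """
--     markers = (
--         "authwall",
--         "checkpoint/challenge",
--         "we noticed some unusual activity",
--         "please complete this security check",
--         "captcha",
--         "cf-browser-verification",
--     )
--     lower = html.lower()
--     for i in range(len(lower)):
--         if any(lower.startswith(m, i) for m in markers):
--             return True
--     return False
-- ===== Notes on version B (the rewrite author's own statement) =====
-- stated objective: alternative
-- what changed: Replaces six independent full substring scans (any(m in lower)) with a single left-to-right sweep over the lowered text that tests all markers at each position, position-major instead of marker-major.
import Mathlib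
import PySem

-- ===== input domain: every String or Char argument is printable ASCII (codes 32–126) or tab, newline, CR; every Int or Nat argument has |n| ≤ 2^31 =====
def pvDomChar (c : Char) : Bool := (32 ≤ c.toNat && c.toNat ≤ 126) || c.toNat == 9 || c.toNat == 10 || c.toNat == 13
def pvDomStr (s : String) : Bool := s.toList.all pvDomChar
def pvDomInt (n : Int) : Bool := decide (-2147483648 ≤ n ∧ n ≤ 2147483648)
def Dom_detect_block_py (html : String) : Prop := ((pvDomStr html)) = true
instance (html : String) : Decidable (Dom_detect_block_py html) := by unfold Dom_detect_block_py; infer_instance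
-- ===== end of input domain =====

-- B replaces the marker-major loop of six full substring scans by one position-major sweep
-- over the lowered text; same cost class, different traversal ("alternative").

-- ===== PORT A =====
def pvMarkers : List String :=
  ["authwall", "checkpoint/challenge", "we noticed some unusual activity",
   "please complete this security check", "captcha", "cf-browser-verification"]

def detect_block_py (html : String) : Bool :=
  let lower := PySem.Str.lower html
  pvMarkers.any (fun m => PySem.Str.isIn m lower)

-- ===== PORT B =====
-- the position loop 'for i in range(len(lower)): if any(lower.startswith(m, i) …)'
-- as structural recursion over the suffixes of the lowered text
def pvScan (ms : List String) : List Char → Bool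
  | [] => false
  | c :: rest =>
    if ms.any (fun m => PySem.Chars.startswith (c :: rest) m.toList) then true
    else pvScan ms rest

def detect_block_py_alt (html : String) : Bool :=
  pvScan pvMarkers (PySem.Chars.lower html.toList)

-- ===== PRECONDITION & SPEC =====
def Spec_detect_block_py (html : String) (out : Bool) : Prop := out = detect_block_py_alt html
instance (html : String) (out : Bool) : Decidable (Spec_detect_block_py html out) := by unfold Spec_detect_block_py; infer_instance

-- ===== CLAIM (what is proved, stated in full; the proofs are below) =====
def Claim_equal_detect_block_py : Prop := ∀ (html : String), Dom_detect_block_py html → Spec_detect_block_py html (detect_block_py html)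

-- ===== LEMMAS AND PROOFS =====

lemma pvAny_congr_mem {α : Type} {l : List α} {p q : α → Bool}
    (h : ∀ a ∈ l, p a = q a) : l.any p = l.any q := by
  induction l with
  | nil => rfl
  | cons a t ih =>
    simp only [List.any_cons, h a (List.mem_cons_self ..),
      ih fun b hb => h b (List.mem_cons_of_mem a hb)]

lemma pvScan_eq_any (ms : List String) (hms : ∀ m ∈ ms, m.toList ≠ []) (s : List Char) :
    pvScan ms s = ms.any (fun m => PySem.Chars.isIn m.toList s) := by
  induction s with
  | nil =>
    simp only [pvScan]
    symm
    rw [List.any_eq_false]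
    intro m hm
    rw [Bool.not_eq_true, PySem.Chars.isIn_eq_false_iff]
    intro hinf
    exact hms m hm (List.eq_nil_of_infix_nil hinf)
  | cons c rest ih =>
    simp only [pvScan]
    split_ifs with h
    · symm
      rw [List.any_eq_true] at h ⊢
      obtain ⟨m, hm, hsw⟩ := h
      refine ⟨m, hm, ?_⟩
      rw [PySem.Chars.isIn_iff_infix]
      exact ((PySem.Chars.startswith_iff _ _).mp hsw).isInfix
    · rw [ih]
      apply pvAny_congr_mem
      intro m hm
      rw [Bool.not_eq_true, List.any_eq_false] at h
      have hns := h m hm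
      rw [PySem.Chars.startswith_iff] at hns
      have : PySem.Chars.isIn m.toList (c :: rest) = PySem.Chars.isIn m.toList rest := by
        by_cases hi : m.toList <:+: rest
        · rw [(PySem.Chars.isIn_iff_infix _ _).mpr hi,
            (PySem.Chars.isIn_iff_infix _ _).mpr (hi.trans (List.suffix_cons c rest).isInfix)]
        · rw [(PySem.Chars.isIn_eq_false_iff _ _).mpr hi,
            (PySem.Chars.isIn_eq_false_iff _ _).mpr ?_]
          rw [List.infix_cons_iff]
          rintro (hp | hinf)
          · exact hns hp
          · exact hi hinf
      exact this.symm

-- ===== VERDICT (by name: the statement is the Claim_ definition above) =====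
theorem detect_block_py_spec : Claim_equal_detect_block_py := by
  intro html _
  unfold Spec_detect_block_py detect_block_py detect_block_py_alt
  rw [pvScan_eq_any pvMarkers (by decide)]
  apply pvAny_congr_mem
  intro m hm
  simp [PySem.Str.isIn, PySem.Str.lower]
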